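-- pv_equiv track=rewrite | github.com/primalfunk/ancient_suffering | tool_distribution.py | divide_map_into_quadrants
-- ===== SOURCE A (Python) =====
-- def divide_map_into_quadrants(map_width, map_height):
--     mid_x, mid_y = map_width // 2, map_height // 2
--     quadrants = {
--         'top_left': [(x, y) for x in range(mid_x) for y in range(mid_y)],
--         'top_right': [(x, y) for x in range(mid_x, map_width) for y in range(mid_y)],
--         'bottom_left': [(x, y) for x in range(mid_x) for y in range(mid_y, map_height)],
--         'bottom_right': [(x, y) for x in range(mid_x, map_width) for y in range(mid_y, map_height)]
--     }
--     return quadrants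
-- ===== SOURCE B (Python) =====
-- def divide_map_into_quadrants(map_width, map_height):
--     mid_x, mid_y = map_width // 2, map_height // 2
--     tl, tr, bl, br = [], [], [], []
--     for x in range(map_width):
--         for y in range(map_height):
--             if x < mid_x:
--                 (tl if y < mid_y else bl).append((x, y))
--             else:
--                 (tr if y < mid_y else br).append((x, y))
--     return {'top_left': tl, 'top_right': tr, 'bottom_left': bl, 'bottom_right': br}
-- ===== Notes on version B (the rewrite author's own statement) =====
-- stated objective: alternative
-- what changed: A builds each quadrant with its own double comprehension (four passes over the grid); B makes a single nested sweep over all cells, classifying each cell by two comparisons and appending it to one of four accumulator lists.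
import Mathlib
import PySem

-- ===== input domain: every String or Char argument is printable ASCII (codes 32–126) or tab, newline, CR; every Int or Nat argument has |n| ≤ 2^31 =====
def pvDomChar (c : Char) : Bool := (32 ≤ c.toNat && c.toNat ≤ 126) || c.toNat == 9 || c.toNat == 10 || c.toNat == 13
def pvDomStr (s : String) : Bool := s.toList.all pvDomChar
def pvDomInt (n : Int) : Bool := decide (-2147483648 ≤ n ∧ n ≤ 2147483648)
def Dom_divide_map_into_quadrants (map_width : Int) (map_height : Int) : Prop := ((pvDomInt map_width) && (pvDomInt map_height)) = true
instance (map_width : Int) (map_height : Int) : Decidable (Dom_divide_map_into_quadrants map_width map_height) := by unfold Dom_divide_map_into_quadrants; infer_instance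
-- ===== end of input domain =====

-- B replaces A's four per-quadrant comprehensions by one nested sweep over all cells,
-- classifying each cell into one of four accumulator lists (alternative decomposition, same cost).


-- ===== PORT A =====
def divide_map_into_quadrants (map_width : Int) (map_height : Int) : List (String × List (Int × Int)) :=
  let mid_x := PySem.Int.floordiv map_width 2
  let mid_y := PySem.Int.floordiv map_height 2
  [("top_left", (PySem.List.pyRange 0 mid_x 1).flatMap (fun x => (PySem.List.pyRange 0 mid_y 1).map (fun y => (x, y)))),
   ("top_right", (PySem.List.pyRange mid_x map_width 1).flatMap (fun x => (PySem.List.pyRange 0 mid_y 1).map (fun y => (x, y)))),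
   ("bottom_left", (PySem.List.pyRange 0 mid_x 1).flatMap (fun x => (PySem.List.pyRange mid_y map_height 1).map (fun y => (x, y)))),
   ("bottom_right", (PySem.List.pyRange mid_x map_width 1).flatMap (fun x => (PySem.List.pyRange mid_y map_height 1).map (fun y => (x, y))))]

-- ===== PORT B =====
-- state: the four accumulator lists (tl, tr, bl, br)
abbrev pvQSt : Type := List (Int × Int) × List (Int × Int) × List (Int × Int) × List (Int × Int)

-- loop body: classify one cell and append it to the chosen list
def pvCell (mid_x mid_y x y : Int) (s : pvQSt) : pvQSt :=
  if x < mid_x then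
    (if y < mid_y then (s.1 ++ [(x, y)], s.2.1, s.2.2.1, s.2.2.2)
     else (s.1, s.2.1, s.2.2.1 ++ [(x, y)], s.2.2.2))
  else
    (if y < mid_y then (s.1, s.2.1 ++ [(x, y)], s.2.2.1, s.2.2.2)
     else (s.1, s.2.1, s.2.2.1, s.2.2.2 ++ [(x, y)]))

def divide_map_into_quadrants_alt (map_width : Int) (map_height : Int) : List (String × List (Int × Int)) :=
  let mid_x := PySem.Int.floordiv map_width 2
  let mid_y := PySem.Int.floordiv map_height 2
  let s := (PySem.List.pyRange 0 map_width 1).foldl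
    (fun s x => (PySem.List.pyRange 0 map_height 1).foldl (fun s y => pvCell mid_x mid_y x y s) s)
    ([], [], [], [])
  [("top_left", s.1), ("top_right", s.2.1), ("bottom_left", s.2.2.1), ("bottom_right", s.2.2.2)]

-- ===== PRECONDITION & SPEC =====
def Spec_divide_map_into_quadrants (map_width : Int) (map_height : Int) (out : List (String × List (Int × Int))) : Prop := out = divide_map_into_quadrants_alt map_width map_height
instance (map_width : Int) (map_height : Int) (out : List (String × List (Int × Int))) : Decidable (Spec_divide_map_into_quadrants map_width map_height out) := by unfold Spec_divide_map_into_quadrants; infer_instance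

-- ===== CLAIM (what is proved, stated in full; the proofs are below) =====
def Claim_equal_divide_map_into_quadrants : Prop := ∀ (map_width : Int) (map_height : Int), Dom_divide_map_into_quadrants map_width map_height → Spec_divide_map_into_quadrants map_width map_height (divide_map_into_quadrants map_width map_height)

-- ===== LEMMAS AND PROOFS =====

def pvRowT (my x : Int) : List (Int × Int) := (PySem.List.pyRange 0 my 1).map (fun y => (x, y))
def pvRowB (my h x : Int) : List (Int × Int) := (PySem.List.pyRange my h 1).map (fun y => (x, y))

lemma pvRange_split (h : Int) :
    PySem.List.pyRange 0 h 1 =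
      PySem.List.pyRange 0 (PySem.Int.floordiv h 2) 1 ++ PySem.List.pyRange (PySem.Int.floordiv h 2) h 1 := by
  by_cases hh : 0 ≤ h
  · have he : PySem.Int.floordiv h 2 = h / 2 := PySem.Int.floordiv_eq_ediv_of_pos (by omega)
    exact PySem.List.pyRange_one_append 0 (PySem.Int.floordiv h 2) h (by omega) (by omega)
  · have he : PySem.Int.floordiv h 2 = h / 2 := PySem.Int.floordiv_eq_ediv_of_pos (by omega)
    rw [PySem.List.pyRange_one_eq_nil (by omega), PySem.List.pyRange_one_eq_nil (by omega),
        PySem.List.pyRange_one_eq_nil (by omega)]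
    rfl

lemma pvInner_lt (mx my x : Int) (hx : x < mx) (ys : List Int) (hy : ∀ y ∈ ys, y < my) :
    ∀ s : pvQSt, ys.foldl (fun s y => pvCell mx my x y s) s =
      (s.1 ++ ys.map (fun y => (x, y)), s.2.1, s.2.2.1, s.2.2.2) := by
  induction ys with
  | nil => intro s; simp
  | cons y ys ih =>
    intro s
    have hy1 : y < my := hy y (by simp)
    rw [List.foldl_cons, show pvCell mx my x y s = (s.1 ++ [(x, y)], s.2.1, s.2.2.1, s.2.2.2) by
          simp [pvCell, hx, hy1],
        ih (fun y hm => hy y (by simp [hm]))]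
    simp

lemma pvInner_lt_ge (mx my x : Int) (hx : x < mx) (ys : List Int) (hy : ∀ y ∈ ys, ¬ y < my) :
    ∀ s : pvQSt, ys.foldl (fun s y => pvCell mx my x y s) s =
      (s.1, s.2.1, s.2.2.1 ++ ys.map (fun y => (x, y)), s.2.2.2) := by
  induction ys with
  | nil => intro s; simp
  | cons y ys ih =>
    intro s
    have hy1 : ¬ y < my := hy y (by simp)
    rw [List.foldl_cons, show pvCell mx my x y s = (s.1, s.2.1, s.2.2.1 ++ [(x, y)], s.2.2.2) by
          simp [pvCell, hx, hy1],
        ih (fun y hm => hy y (by simp [hm]))]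
    simp

lemma pvInner_ge (mx my x : Int) (hx : ¬ x < mx) (ys : List Int) (hy : ∀ y ∈ ys, y < my) :
    ∀ s : pvQSt, ys.foldl (fun s y => pvCell mx my x y s) s =
      (s.1, s.2.1 ++ ys.map (fun y => (x, y)), s.2.2.1, s.2.2.2) := by
  induction ys with
  | nil => intro s; simp
  | cons y ys ih =>
    intro s
    have hy1 : y < my := hy y (by simp)
    rw [List.foldl_cons, show pvCell mx my x y s = (s.1, s.2.1 ++ [(x, y)], s.2.2.1, s.2.2.2) by
          simp [pvCell, hx, hy1],
        ih (fun y hm => hy y (by simp [hm]))]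
    simp

lemma pvInner_ge_ge (mx my x : Int) (hx : ¬ x < mx) (ys : List Int) (hy : ∀ y ∈ ys, ¬ y < my) :
    ∀ s : pvQSt, ys.foldl (fun s y => pvCell mx my x y s) s =
      (s.1, s.2.1, s.2.2.1, s.2.2.2 ++ ys.map (fun y => (x, y))) := by
  induction ys with
  | nil => intro s; simp
  | cons y ys ih =>
    intro s
    have hy1 : ¬ y < my := hy y (by simp)
    rw [List.foldl_cons, show pvCell mx my x y s = (s.1, s.2.1, s.2.2.1, s.2.2.2 ++ [(x, y)]) by
          simp [pvCell, hx, hy1],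
        ih (fun y hm => hy y (by simp [hm]))]
    simp

-- one row of the sweep, for my = h // 2
lemma pvRow_lt (mx h x : Int) (hx : x < mx) (s : pvQSt) :
    (PySem.List.pyRange 0 h 1).foldl (fun s y => pvCell mx (PySem.Int.floordiv h 2) x y s) s =
      (s.1 ++ pvRowT (PySem.Int.floordiv h 2) x, s.2.1,
       s.2.2.1 ++ pvRowB (PySem.Int.floordiv h 2) h x, s.2.2.2) := by
  rw [pvRange_split h, List.foldl_append,
      pvInner_lt mx _ x hx _ (fun y hm => (PySem.List.mem_pyRange_one.mp hm).2),
      pvInner_lt_ge mx _ x hx _ (fun y hm => by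
        have := (PySem.List.mem_pyRange_one.mp hm).1; omega)]
  rfl

lemma pvRow_ge (mx h x : Int) (hx : ¬ x < mx) (s : pvQSt) :
    (PySem.List.pyRange 0 h 1).foldl (fun s y => pvCell mx (PySem.Int.floordiv h 2) x y s) s =
      (s.1, s.2.1 ++ pvRowT (PySem.Int.floordiv h 2) x, s.2.2.1,
       s.2.2.2 ++ pvRowB (PySem.Int.floordiv h 2) h x) := by
  rw [pvRange_split h, List.foldl_append,
      pvInner_ge mx _ x hx _ (fun y hm => (PySem.List.mem_pyRange_one.mp hm).2),
      pvInner_ge_ge mx _ x hx _ (fun y hm => by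
        have := (PySem.List.mem_pyRange_one.mp hm).1; omega)]
  rfl

lemma pvOuter_lt (mx h : Int) (xs : List Int) (hxs : ∀ x ∈ xs, x < mx) :
    ∀ s : pvQSt,
      xs.foldl (fun s x => (PySem.List.pyRange 0 h 1).foldl (fun s y => pvCell mx (PySem.Int.floordiv h 2) x y s) s) s =
      (s.1 ++ xs.flatMap (pvRowT (PySem.Int.floordiv h 2)), s.2.1,
       s.2.2.1 ++ xs.flatMap (pvRowB (PySem.Int.floordiv h 2) h), s.2.2.2) := by
  induction xs with
  | nil => intro s; simp
  | cons x xs ih =>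
    intro s
    rw [List.foldl_cons, pvRow_lt mx h x (hxs x (by simp)),
        ih (fun x hm => hxs x (by simp [hm]))]
    simp

lemma pvOuter_ge (mx h : Int) (xs : List Int) (hxs : ∀ x ∈ xs, ¬ x < mx) :
    ∀ s : pvQSt,
      xs.foldl (fun s x => (PySem.List.pyRange 0 h 1).foldl (fun s y => pvCell mx (PySem.Int.floordiv h 2) x y s) s) s =
      (s.1, s.2.1 ++ xs.flatMap (pvRowT (PySem.Int.floordiv h 2)), s.2.2.1,
       s.2.2.2 ++ xs.flatMap (pvRowB (PySem.Int.floordiv h 2) h)) := by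
  induction xs with
  | nil => intro s; simp
  | cons x xs ih =>
    intro s
    rw [List.foldl_cons, pvRow_ge mx h x (hxs x (by simp)),
        ih (fun x hm => hxs x (by simp [hm]))]
    simp

-- ===== VERDICT (by name: the statement is the Claim_ definition above) =====
theorem divide_map_into_quadrants_spec : Claim_equal_divide_map_into_quadrants := by
  intro w h _
  unfold Spec_divide_map_into_quadrants
  simp only [divide_map_into_quadrants, divide_map_into_quadrants_alt]
  rw [pvRange_split w, List.foldl_append,
      pvOuter_lt (PySem.Int.floordiv w 2) h _
        (fun x hm => (PySem.List.mem_pyRange_one.mp hm).2),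
      pvOuter_ge (PySem.Int.floordiv w 2) h _
        (fun x hm => by have := (PySem.List.mem_pyRange_one.mp hm).1; omega)]
  simp
  exact ⟨rfl, rfl, rfl, rfl⟩
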